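-- pv_equiv track=rewrite | github.com/matheusferro/Python | testes.py | e_hipotenusa
-- ===== SOURCE A (Python) =====
-- def primo(x):
--     i = False
--     while i == False:
--         div = 1
--         contador = 0
--         while div <= x:
--             if (x % div == 0):
--                 contador += 1
--                 div += 1
--             else:
--                 div += 1
--         if(contador == 2):
--             i = True
--         else:
--             x -= 1
--     return(x)
--
-- def e_hipotenusa(n):
--     n_primo = primo(n)
--     while n_primo != 2:
--         if(n % n_primo == 0 and n_primo % 4 == 1):
--             return(1)
--         else:
--             n_primo = primo(n_primo-1)
--     return(0)
-- ===== SOURCE B (Python) =====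
-- def e_hipotenusa(n):
--     m = n
--     p = 2
--     while p * p <= m:
--         if m % p == 0:
--             if p % 4 == 1:
--                 return 1
--             while m % p == 0:
--                 m //= p
--         p += 1
--     return 1 if m > 1 and m % 4 == 1 else 0
-- ===== Notes on version B (the rewrite author's own statement) =====
-- stated objective: faster
-- what changed: A repeatedly finds the largest prime <= n by decrementing and counting all divisors of each candidate, scanning every prime below n top-down; B factorizes n once by trial division up to sqrt(n), testing each prime factor mod 4.
-- outside the precondition, e.g. on e_hipotenusa(1): A does not finish within the time limit, B returns 0
import Mathlib
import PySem

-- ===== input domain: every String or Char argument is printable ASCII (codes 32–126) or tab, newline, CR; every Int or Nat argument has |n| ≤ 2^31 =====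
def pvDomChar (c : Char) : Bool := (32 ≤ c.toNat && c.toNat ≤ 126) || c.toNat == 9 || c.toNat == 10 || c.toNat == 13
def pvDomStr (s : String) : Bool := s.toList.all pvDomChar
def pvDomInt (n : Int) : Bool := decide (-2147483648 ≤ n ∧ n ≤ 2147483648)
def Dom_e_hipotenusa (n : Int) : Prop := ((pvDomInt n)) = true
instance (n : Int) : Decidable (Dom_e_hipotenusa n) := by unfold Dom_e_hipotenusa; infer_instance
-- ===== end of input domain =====

-- B replaces A's repeated largest-prime-below search (divisor counting per candidate) by a single
-- trial-division factorization of n up to sqrt(n), testing each prime factor mod 4 — asymptotically faster.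

-- ===== PORT A =====
-- inner while of primo: counts divisors 'div' of x in [div, x]
def pvCount (x div c : Int) : Int :=
  if _h : div ≤ x then
    if PySem.Int.mod x div = 0 then pvCount x (div + 1) (c + 1) else pvCount x (div + 1) c
  else c
termination_by (x + 1 - div).toNat
decreasing_by all_goals omega

-- outer while of primo: decrement x until it has exactly 2 divisors; fuel only guards totality
-- (Python diverges for x < 2; such calls are outside Pre_ below)
def pvPrimoGo : Nat → Int → Int
  | 0, x => x
  | f + 1, x => if pvCount x 1 0 = 2 then x else pvPrimoGo f (x - 1)

def pvPrimo (x : Int) : Int := pvPrimoGo (x.toNat + 1) x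

-- the while of e_hipotenusa; fuel only guards totality
def pvEhipGo : Nat → Int → Int → Int
  | 0, _, _ => 0
  | f + 1, n, np =>
    if np ≠ 2 then
      if PySem.Int.mod n np = 0 ∧ PySem.Int.mod np 4 = 1 then 1
      else pvEhipGo f n (pvPrimo (np - 1))
    else 0

def e_hipotenusa (n : Int) : Int := pvEhipGo (n.toNat + 1) n (pvPrimo n)

-- ===== PORT B =====
-- inner while of B: divide out the factor p; fuel only guards totality
def pvStripGo : Nat → Int → Int → Int
  | 0, m, _ => m
  | f + 1, m, p =>
    if PySem.Int.mod m p = 0 then pvStripGo f (PySem.Int.floordiv m p) p else m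

-- outer while of B; fuel only guards totality
def pvAltGo : Nat → Int → Int → Int
  | 0, _, _ => 0
  | f + 1, m, p =>
    if p * p ≤ m then
      if PySem.Int.mod m p = 0 then
        if PySem.Int.mod p 4 = 1 then 1
        else pvAltGo f (pvStripGo (m.toNat + 1) m p) (p + 1)
      else pvAltGo f m (p + 1)
    else if 1 < m ∧ PySem.Int.mod m 4 = 1 then 1 else 0

def e_hipotenusa_alt (n : Int) : Int := pvAltGo (n.toNat + 2) n 2

-- ===== PRECONDITION & SPEC =====
-- Pre_ excludes n < 2, on which A's helper primo never terminates (Python A diverges there).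
def Pre_e_hipotenusa (n : Int) : Prop := 2 ≤ n
instance (n : Int) : Decidable (Pre_e_hipotenusa n) := by unfold Pre_e_hipotenusa; infer_instance
def pvWitness_e_hipotenusa : Int := (9)

def Spec_e_hipotenusa (n : Int) (out : Int) : Prop := out = e_hipotenusa_alt n
instance (n : Int) (out : Int) : Decidable (Spec_e_hipotenusa n out) := by unfold Spec_e_hipotenusa; infer_instance

-- ===== CLAIM (what is proved, stated in full; the proofs are below) =====
def Claim_equal_e_hipotenusa : Prop := ∀ (n : Int), Dom_e_hipotenusa n → Pre_e_hipotenusa n → Spec_e_hipotenusa n (e_hipotenusa n)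

-- ===== LEMMAS AND PROOFS =====

-- "q is a prime factor of n congruent 1 mod 4" -- what both programs detect
def pvGood (n q : Int) : Prop := 2 ≤ q ∧ Prime q ∧ q ∣ n ∧ PySem.Int.mod q 4 = 1

-- "x has no divisor strictly between 1 and x"
def pvMid (x : Int) : Prop := ∀ d : Int, 1 < d → d < x → ¬ d ∣ x

lemma pvIcc_insert (d x : Int) (h : d ≤ x) :
    Finset.Icc d x = insert d (Finset.Icc (d + 1) x) := by
  ext t; simp only [Finset.mem_Icc, Finset.mem_insert]; omega

lemma pvCount_spec (x : Int) : ∀ (d c : Int),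
    pvCount x d c = c + ((Finset.Icc d x).filter (fun t => PySem.Int.mod x t = 0)).card := by
  intro d c
  induction d, c using pvCount.induct x with
  | case1 d c h hm ih =>
    rw [pvCount, dif_pos h, if_pos hm, ih, pvIcc_insert d x h, Finset.filter_insert, if_pos hm,
      Finset.card_insert_of_notMem (by simp [Finset.mem_Icc])]
    push_cast; ring
  | case2 d c h hm ih =>
    rw [pvCount, dif_pos h, if_neg hm, ih, pvIcc_insert d x h, Finset.filter_insert, if_neg hm]
  | case3 d c h =>
    rw [pvCount, dif_neg h, Finset.Icc_eq_empty (by omega), Finset.filter_empty,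
      Finset.card_empty]
    ring

lemma pvCount_two_iff (x : Int) (hx : 2 ≤ x) : pvCount x 1 0 = 2 ↔ pvMid x := by
  rw [pvCount_spec]
  have hmem : ∀ t : Int, t ∈ (Finset.Icc 1 x).filter (fun t => PySem.Int.mod x t = 0) ↔
      (1 ≤ t ∧ t ≤ x ∧ t ∣ x) := by
    intro t
    simp [Finset.mem_filter, Finset.mem_Icc, PySem.Int.mod_eq_zero_iff_dvd, and_assoc]
  constructor
  · intro h d hd1 hdx hdvd
    have hsub : ({1, d, x} : Finset Int) ⊆ (Finset.Icc 1 x).filter (fun t => PySem.Int.mod x t = 0) := by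
      intro t ht
      rw [hmem]
      rcases Finset.mem_insert.mp ht with rfl | ht
      · exact ⟨le_refl 1, by omega, one_dvd x⟩
      · rcases Finset.mem_insert.mp ht with rfl | ht
        · exact ⟨by omega, by omega, hdvd⟩
        · rw [Finset.mem_singleton] at ht
          exact ⟨by omega, le_of_eq ht, ht ▸ dvd_rfl⟩
    have h3 : ({1, d, x} : Finset Int).card = 3 := by
      rw [Finset.card_insert_of_notMem (by simp; omega),
        Finset.card_insert_of_notMem (by simp; omega), Finset.card_singleton]
    have := Finset.card_le_card hsub
    omega
  · intro h
    have : (Finset.Icc 1 x).filter (fun t => PySem.Int.mod x t = 0) = {1, x} := by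
      ext t
      rw [hmem]
      simp only [Finset.mem_insert, Finset.mem_singleton]
      constructor
      · rintro ⟨h1, h2, h3⟩
        by_contra hne
        push Not at hne
        exact h t (by omega) (by omega) h3
      · rintro (rfl | h1)
        · exact ⟨le_refl 1, by omega, one_dvd _⟩
        · exact ⟨by omega, le_of_eq h1, h1 ▸ dvd_rfl⟩
    rw [this, Finset.card_pair (by omega)]
    norm_num

lemma pvPrime_iff_mid (x : Int) (hx : 2 ≤ x) : Prime x ↔ pvMid x := by
  constructor
  · intro hp d hd1 hdx hdvd
    have h1 : d.natAbs ∣ x.natAbs := Int.natAbs_dvd_natAbs.mpr hdvd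
    have hx' : Nat.Prime x.natAbs := Int.prime_iff_natAbs_prime.mp hp
    rcases (Nat.Prime.eq_one_or_self_of_dvd hx') d.natAbs h1 with h | h <;> omega
  · intro h
    rw [Int.prime_iff_natAbs_prime]
    rw [Nat.prime_def_lt]
    constructor
    · omega
    · intro m hm hmd
      by_contra hm1
      have h2 : 2 ≤ m := by
        rcases Nat.eq_zero_or_pos m with h0 | h0
        · subst h0; simp at hmd; omega
        · omega
      have : (m : Int) ∣ x := by
        have := Int.natCast_dvd_natCast.mpr hmd
        rwa [Int.natAbs_of_nonneg (by omega)] at this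
      exact h m (by exact_mod_cast h2) (by omega) this

lemma pvPrimoGo_spec : ∀ (f : Nat) (x : Int), 2 ≤ x → x - 1 ≤ (f : Int) →
    2 ≤ pvPrimoGo f x ∧ Prime (pvPrimoGo f x) ∧ pvPrimoGo f x ≤ x ∧
      ∀ q, pvPrimoGo f x < q → q ≤ x → ¬ Prime q := by
  intro f
  induction f with
  | zero => intro x hx hf; omega
  | succ f ih =>
    intro x hx hf
    by_cases hc : pvCount x 1 0 = 2
    · have hp : Prime x := (pvPrime_iff_mid x hx).mpr ((pvCount_two_iff x hx).mp hc)
      simp only [pvPrimoGo, if_pos hc]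
      exact ⟨hx, hp, le_refl x, fun q h1 h2 _ => by omega⟩
    · have hnp : ¬ Prime x := fun hp =>
        hc ((pvCount_two_iff x hx).mpr ((pvPrime_iff_mid x hx).mp hp))
    -- x = 2 is prime, so x ≥ 3 here
      have hx3 : 3 ≤ x := by
        rcases eq_or_lt_of_le hx with h2 | h2
        · exact absurd (h2 ▸ Int.prime_two) hnp
        · omega
      have := ih (x - 1) (by omega) (by omega)
      simp only [pvPrimoGo, if_neg hc]
      refine ⟨this.1, this.2.1, by omega, fun q h1 h2 => ?_⟩
      rcases eq_or_lt_of_le h2 with h3 | h3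
      · exact h3 ▸ hnp
      · exact this.2.2.2 q h1 (by omega)

lemma pvEhipGo_spec : ∀ (f : Nat) (n np : Int), 2 ≤ n → 2 ≤ np → np ≤ n → Prime np →
    np - 1 ≤ (f : Int) →
    (∀ q, np < q → q ≤ n → Prime q → ¬ (q ∣ n ∧ PySem.Int.mod q 4 = 1)) →
    (pvEhipGo f n np = 1 ∧ ∃ q, pvGood n q) ∨ (pvEhipGo f n np = 0 ∧ ¬ ∃ q, pvGood n q) := by
  intro f
  induction f with
  | zero => intro n np h1 h2 h3 h4 h5 h6; omega
  | succ f ih =>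
    intro n np h1 h2 h3 hp hf hg
    by_cases h2' : np = 2
    · subst h2'
      simp only [pvEhipGo, ne_eq, not_true_eq_false, if_false]
      refine Or.inr ⟨by trivial, ?_⟩
      rintro ⟨q, hq2, hqp, hqd, hq4⟩
      have hqn : q ≤ n := Int.le_of_dvd (by omega) hqd
      rcases eq_or_lt_of_le hq2 with h | h
      · rw [← h] at hq4; simp [PySem.Int.mod] at hq4
      · exact hg q h hqn hqp ⟨hqd, hq4⟩
    · simp only [pvEhipGo, if_pos h2']
      by_cases hcond : PySem.Int.mod n np = 0 ∧ PySem.Int.mod np 4 = 1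
      · rw [if_pos hcond]
        exact Or.inl ⟨rfl, np, h2, hp,
          (PySem.Int.mod_eq_zero_iff_dvd n np).mp hcond.1, hcond.2⟩
      · rw [if_neg hcond]
        have hps := pvPrimoGo_spec ((np - 1).toNat + 1) (np - 1) (by omega) (by omega)
        obtain ⟨hg2, hgp, hgle, hgmax⟩ := hps
        have hpe : pvPrimo (np - 1) = pvPrimoGo ((np - 1).toNat + 1) (np - 1) := rfl
        rw [hpe]
        refine ih n (pvPrimoGo ((np - 1).toNat + 1) (np - 1)) h1 hg2 (by omega) hgp (by omega) ?_
        intro q hq1 hq2 hq3 ⟨hqd, hq4⟩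
        rcases lt_trichotomy q np with h | h | h
        · exact hgmax q hq1 (by omega) hq3
        · subst h
          exact hcond ⟨(PySem.Int.mod_eq_zero_iff_dvd n q).mpr hqd, hq4⟩
        · exact hg q h hq2 hq3 ⟨hqd, hq4⟩

lemma pvA_spec (n : Int) (hn : 2 ≤ n) :
    (e_hipotenusa n = 1 ∧ ∃ q, pvGood n q) ∨ (e_hipotenusa n = 0 ∧ ¬ ∃ q, pvGood n q) := by
  obtain ⟨hg2, hgp, hgle, hgmax⟩ := pvPrimoGo_spec (n.toNat + 1) n hn (by omega)
  have hpe : e_hipotenusa n = pvEhipGo (n.toNat + 1) n (pvPrimoGo (n.toNat + 1) n) := rfl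
  rw [hpe]
  exact pvEhipGo_spec (n.toNat + 1) n _ hn hg2 hgle hgp (by omega)
    (fun q h1 h2 h3 _ => hgmax q h1 h2 h3)

lemma pvP_prime (m p : Int) (_hm : 1 ≤ m) (hp : 2 ≤ p) (hdvd : p ∣ m)
    (hmin : ∀ q, 2 ≤ q → Prime q → q ∣ m → p ≤ q) : Prime p := by
  obtain ⟨q, hqp, hqd⟩ := Int.exists_prime_and_dvd (n := p) (by omega)
  have hq2 : 2 ≤ (q.natAbs : Int) := by
    have := (Int.prime_iff_natAbs_prime.mp hqp).two_le
    omega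
  have hqp' : Prime ((q.natAbs : Int)) := by
    rw [Int.prime_iff_natAbs_prime, Int.natAbs_natCast]
    exact Int.prime_iff_natAbs_prime.mp hqp
  have hqd' : (q.natAbs : Int) ∣ p := (Int.natAbs_dvd).mpr hqd
  have h1 : p ≤ (q.natAbs : Int) := hmin _ hq2 hqp' (hqd'.trans hdvd)
  have h2 : (q.natAbs : Int) ≤ p := Int.le_of_dvd (by omega) hqd'
  have : (q.natAbs : Int) = p := by omega
  rwa [← this]

lemma pvStripGo_spec : ∀ (f : Nat) (m p : Int), 1 ≤ m → 2 ≤ p → m.toNat ≤ f →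
    ∃ k : Nat, m = p ^ k * pvStripGo f m p ∧ 1 ≤ pvStripGo f m p ∧ ¬ p ∣ pvStripGo f m p := by
  intro f
  induction f with
  | zero => intro m p h1 h2 h3; omega
  | succ f ih =>
    intro m p h1 h2 h3
    by_cases hc : PySem.Int.mod m p = 0
    · have hdvd : p ∣ m := (PySem.Int.mod_eq_zero_iff_dvd m p).mp hc
      have hfd : PySem.Int.floordiv m p = m / p := PySem.Int.floordiv_eq_ediv_of_pos (by omega)
      have hexact : p * (m / p) = m := Int.mul_ediv_cancel' hdvd
      have hmp : p ≤ m := Int.le_of_dvd (by omega) hdvd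
      have hq1 : 1 ≤ m / p := by
        rcases Int.lt_or_le (m / p) 1 with h | h
        · nlinarith [hexact]
        · exact h
      have hlt : m / p < m := by nlinarith [hexact]
      simp only [pvStripGo, if_pos hc, hfd]
      obtain ⟨k, hk1, hk2, hk3⟩ := ih (m / p) p hq1 h2 (by omega)
      exact ⟨k + 1, by rw [pow_succ]; nlinarith [hk1], hk2, hk3⟩
    · simp only [pvStripGo, if_neg hc]
      exact ⟨0, by ring_nf, h1, fun hd => hc ((PySem.Int.mod_eq_zero_iff_dvd m p).mpr hd)⟩

lemma pvAltGo_spec : ∀ (f : Nat) (n m p : Int), 2 ≤ n → 1 ≤ m → m ∣ n → 2 ≤ p →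
    m + 2 - p ≤ (f : Int) → 1 ≤ f →
    (∀ q, 2 ≤ q → Prime q → q ∣ m → p ≤ q) →
    (∀ q, pvGood n q → q ∣ m) →
    (pvAltGo f m p = 1 ∧ ∃ q, pvGood n q) ∨ (pvAltGo f m p = 0 ∧ ¬ ∃ q, pvGood n q) := by
  intro f
  induction f with
  | zero => intro n m p _ _ _ _ _ h6 _ _; omega
  | succ f ih =>
    intro n m p hn hm hmn hp hf _ hmin hgood
    by_cases hloop : p * p ≤ m
    · have hpm : p < m := by nlinarith
      by_cases hmod : PySem.Int.mod m p = 0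
      · have hdvd : p ∣ m := (PySem.Int.mod_eq_zero_iff_dvd m p).mp hmod
        have hpp : Prime p := pvP_prime m p hm hp hdvd hmin
        by_cases h4 : PySem.Int.mod p 4 = 1
        · simp only [pvAltGo, if_pos hloop, if_pos hmod, if_pos h4]
          exact Or.inl ⟨by trivial, p, hp, hpp, hdvd.trans hmn, h4⟩
        · simp only [pvAltGo, if_pos hloop, if_pos hmod, if_neg h4]
          obtain ⟨k, hk1, hk2, hk3⟩ := pvStripGo_spec (m.toNat + 1) m p hm hp (by omega)
          set m' := pvStripGo (m.toNat + 1) m p with hm'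
          have hm'd : m' ∣ m := Dvd.intro_left _ hk1.symm
          have hm'le : m' ≤ m := Int.le_of_dvd (by omega) hm'd
          refine ih n m' (p + 1) hn hk2 (hm'd.trans hmn) (by omega) (by omega) (by omega)
            ?_ ?_
          · intro q hq2 hqp hqd
            have hge : p ≤ q := hmin q hq2 hqp (hqd.trans hm'd)
            rcases eq_or_lt_of_le hge with h | h
            · exact absurd (h ▸ hqd) hk3
            · omega
          · intro q hq
            have hqm : q ∣ m := hgood q hq
            obtain ⟨hq2, hqp, _, hq4⟩ := hq
            rw [hk1] at hqm
            rcases hqp.2.2 _ _ hqm with h | h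
            · -- q ∣ p ^ k, so q = p, contradicting p % 4 ≠ 1
              exfalso
              have hqdp : q ∣ p := hqp.dvd_of_dvd_pow (by exact_mod_cast h)
              have h1 : q ≤ p := Int.le_of_dvd (by omega) hqdp
              have h2 : p ≤ q := hmin q hq2 hqp (hqdp.trans hdvd)
              have : q = p := by omega
              exact h4 (this ▸ hq4)
            · exact h
      · simp only [pvAltGo, if_pos hloop, if_neg hmod]
        refine ih n m (p + 1) hn hm hmn (by omega) (by omega) (by omega) ?_ hgood
        intro q hq2 hqp hqd
        have hge : p ≤ q := hmin q hq2 hqp hqd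
        rcases eq_or_lt_of_le hge with h | h
        · rw [← h] at hqd
          exact absurd ((PySem.Int.mod_eq_zero_iff_dvd m p).mpr hqd) hmod
        · omega
    · -- terminal: p * p > m
      simp only [pvAltGo, if_neg hloop]
      by_cases hm1 : m = 1
      · subst hm1
        rw [if_neg (by norm_num)]
        refine Or.inr ⟨rfl, ?_⟩
        rintro ⟨q, hq2, hqp, hqd, hq4⟩
        have := Int.le_of_dvd (by omega) (hgood q ⟨hq2, hqp, hqd, hq4⟩)
        omega
      · have hm2 : 2 ≤ m := by omega
        -- m is prime: any proper factorization d * e would give two prime factors ≥ p, so m ≥ p² > m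
        have hmprime : Prime m := by
          rw [pvPrime_iff_mid m hm2]
          intro d hd1 hdm hddvd
          obtain ⟨e, he⟩ := hddvd
          have he1 : 1 < e := by nlinarith
          have hem : e < m := by nlinarith
          obtain ⟨q, hqp, hqd⟩ := Int.exists_prime_and_dvd (n := d) (by omega)
          obtain ⟨q', hqp', hqd'⟩ := Int.exists_prime_and_dvd (n := e) (by omega)
          have hq2 : 2 ≤ (q.natAbs : Int) := by have := (Int.prime_iff_natAbs_prime.mp hqp).two_le; omega
          have hq2' : 2 ≤ (q'.natAbs : Int) := by have := (Int.prime_iff_natAbs_prime.mp hqp').two_le; omega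
          have hqpd : (q.natAbs : Int) ∣ d := Int.natAbs_dvd.mpr hqd
          have hqpe : (q'.natAbs : Int) ∣ e := Int.natAbs_dvd.mpr hqd'
          have hqprime : Prime ((q.natAbs : Int)) := by
            rw [Int.prime_iff_natAbs_prime, Int.natAbs_natCast]; exact Int.prime_iff_natAbs_prime.mp hqp
          have hqprime' : Prime ((q'.natAbs : Int)) := by
            rw [Int.prime_iff_natAbs_prime, Int.natAbs_natCast]; exact Int.prime_iff_natAbs_prime.mp hqp'
          have hql : p ≤ (q.natAbs : Int) := hmin _ hq2 hqprime (hqpd.trans ⟨e, he⟩)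
          have hql' : p ≤ (q'.natAbs : Int) := hmin _ hq2' hqprime' (hqpe.trans ⟨d, by linarith [he]; ⟩)
          have hqld : (q.natAbs : Int) ≤ d := Int.le_of_dvd (by omega) hqpd
          have hqle : (q'.natAbs : Int) ≤ e := Int.le_of_dvd (by omega) hqpe
          nlinarith
        by_cases h4 : PySem.Int.mod m 4 = 1
        · rw [if_pos ⟨by omega, h4⟩]
          exact Or.inl ⟨rfl, m, hm2, hmprime, hmn, h4⟩
        · rw [if_neg (by intro ⟨_, h⟩; exact h4 h)]
          refine Or.inr ⟨rfl, ?_⟩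
          rintro ⟨q, hq2, hqp, hqd, hq4⟩
          have hqm : q ∣ m := hgood q ⟨hq2, hqp, hqd, hq4⟩
          have h1 : q ≤ m := Int.le_of_dvd (by omega) hqm
          -- q prime divides prime m with 2 ≤ q: q = m
          have : ¬ (1 < q ∧ q < m) := fun ⟨a, b⟩ => (pvPrime_iff_mid m hm2).mp hmprime q a b hqm
          have hqem : q = m := by omega
          exact h4 (hqem ▸ hq4)

lemma pvB_spec (n : Int) (hn : 2 ≤ n) :
    (e_hipotenusa_alt n = 1 ∧ ∃ q, pvGood n q) ∨ (e_hipotenusa_alt n = 0 ∧ ¬ ∃ q, pvGood n q) := by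
  have hpe : e_hipotenusa_alt n = pvAltGo (n.toNat + 2) n 2 := rfl
  rw [hpe]
  exact pvAltGo_spec (n.toNat + 2) n n 2 hn (by omega) dvd_rfl (by omega) (by omega) (by omega)
    (fun q hq _ _ => hq) (fun q hq => hq.2.2.1)

-- ===== VERDICT (by name: the statement is the Claim_ definition above) =====
theorem e_hipotenusa_spec : Claim_equal_e_hipotenusa := by
  intro n _ hpre
  unfold Spec_e_hipotenusa
  rcases pvA_spec n hpre with ⟨ha, hex⟩ | ⟨ha, hex⟩ <;>
    rcases pvB_spec n hpre with ⟨hb, hex'⟩ | ⟨hb, hex'⟩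
  · rw [ha, hb]
  · exact absurd hex hex'
  · exact absurd hex' hex
  · rw [ha, hb]
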